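-- pv_equiv track=rewrite | github.com/laagom/Algorithm | 프로그래머스/unrated/181874. A 강조하기/A 강조하기.py | solution
-- ===== SOURCE A (Python) =====
-- def solution(myString):
--     myString = list(myString)
--     for i, char in enumerate(myString):
--         if char == "a":
--             myString[i] = "A"
--         elif char != "A":
--             myString[i] = char.lower()
--     return ''.join(myString)
-- ===== SOURCE B (Python) =====
-- def solution(myString):
--     return myString.lower().replace('a', 'A')
-- ===== Notes on version B (the rewrite author's own statement) =====
-- stated objective: idiomatic
-- what changed: Replaced the per-character index loop with conditional assignment by two whole-string library sweeps: lowercase everything, then replace every 'a' with 'A'.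
import Mathlib
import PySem

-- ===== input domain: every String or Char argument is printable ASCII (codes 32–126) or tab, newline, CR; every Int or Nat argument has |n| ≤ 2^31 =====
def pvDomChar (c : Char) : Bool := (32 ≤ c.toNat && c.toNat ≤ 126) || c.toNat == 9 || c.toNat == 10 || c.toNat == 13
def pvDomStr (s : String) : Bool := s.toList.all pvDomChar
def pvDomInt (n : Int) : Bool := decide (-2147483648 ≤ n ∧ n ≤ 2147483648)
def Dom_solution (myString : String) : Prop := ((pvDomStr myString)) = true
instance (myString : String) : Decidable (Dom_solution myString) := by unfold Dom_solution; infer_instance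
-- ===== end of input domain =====

-- B replaces A's per-character index loop by two whole-string sweeps: lower() then replace('a','A') (idiomatic).


-- ===== PORT A =====
-- A walks the characters once; per character: 'a' ↦ 'A', any non-'A' ↦ its lowercase, 'A' stays.
def solutionChar (c : Char) : Char :=
  if c = 'a' then 'A'
  else if c ≠ 'A' then PySem.Chars.lowerChar c
  else c

def solution (myString : String) : String :=
  String.ofList (myString.toList.map solutionChar)

-- ===== PORT B =====
def solution_alt (myString : String) : String :=
  PySem.Str.replace (PySem.Str.lower myString) "a" "A"

-- ===== PRECONDITION & SPEC =====
def Spec_solution (myString : String) (out : String) : Prop := out = solution_alt myString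
instance (myString : String) (out : String) : Decidable (Spec_solution myString out) := by unfold Spec_solution; infer_instance

-- ===== CLAIM (what is proved, stated in full; the proofs are below) =====
def Claim_equal_solution : Prop := ∀ (myString : String), Dom_solution myString → Spec_solution myString (solution myString)

-- ===== LEMMAS AND PROOFS =====

theorem toNat_ofNat_valid (n : Nat) (h : n.isValidChar) : (Char.ofNat n).toNat = n := by
  simp [Char.ofNat, h, Char.ofNatAux, Char.toNat]

-- replace with the single-char pattern "a" is the pointwise substitution
theorem replace_go_a (l acc : List Char) (fuel : Nat) (h : l.length ≤ fuel) :
    PySem.Chars.replace.go ['a'] ['A'] fuel l acc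
      = acc.reverse ++ l.map (fun c => if c = 'a' then 'A' else c) := by
  induction fuel generalizing l acc with
  | zero =>
    interval_cases hl : l.length
    · simp [List.length_eq_zero_iff.mp hl, PySem.Chars.replace.go]
  | succ n ih =>
    cases l with
    | nil => simp [PySem.Chars.replace.go]
    | cons c t =>
      simp only [PySem.Chars.replace.go]
      by_cases hc : c = 'a'
      · subst hc
        rw [if_pos (by simp [List.isPrefixOf])]
        simp only [List.length_cons] at h
        rw [show List.drop ['a'].length ('a' :: t) = t from rfl]
        rw [ih t _ (by omega)]
        simp
      · rw [if_neg (by simp [List.isPrefixOf]; exact fun h' => hc h'.symm)]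
        simp only [List.length_cons] at h
        rw [ih t _ (by omega)]
        simp [hc]

theorem replace_a (l : List Char) :
    PySem.Chars.replace l ['a'] ['A'] = l.map (fun c => if c = 'a' then 'A' else c) := by
  simp only [PySem.Chars.replace, List.isEmpty_cons]
  rw [if_neg (by decide)]
  exact replace_go_a l [] l.length le_rfl

theorem lowerChar_eq_a {c : Char} (h : PySem.Chars.lowerChar c = 'a') : c = 'a' ∨ c = 'A' := by
  unfold PySem.Chars.lowerChar PySem.Chars.isupper at h
  split at h
  · rename_i hu
    simp only [decide_eq_true_eq, Bool.and_eq_true] at hu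
    right
    have hv : (c.toNat + 32).isValidChar := by
      have h1 : c.toNat ≤ 90 := hu.2
      left; omega
    have := congrArg Char.toNat h
    rw [toNat_ofNat_valid _ hv] at this
    have h97 : c.toNat = 65 := by
      have : c.toNat + 32 = 97 := by rw [this]; rfl
      omega
    exact Char.ext (by
      apply UInt32.toNat_inj.mp
      show c.val.toNat = 'A'.val.toNat
      exact h97)
  · exact Or.inl h

theorem char_pointwise (c : Char) :
    (if PySem.Chars.lowerChar c = 'a' then 'A' else PySem.Chars.lowerChar c) = solutionChar c := by
  by_cases ha : c = 'a'
  · subst ha; decide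
  · by_cases hA : c = 'A'
    · subst hA; decide
    · have hne : PySem.Chars.lowerChar c ≠ 'a' := fun h => by
        rcases lowerChar_eq_a h with h' | h' <;> [exact ha h'; exact hA h']
      simp [hne, solutionChar, ha, hA]

-- ===== VERDICT (by name: the statement is the Claim_ definition above) =====
theorem solution_spec : Claim_equal_solution := by
  intro s _
  unfold Spec_solution solution solution_alt
  apply String.ext
  rw [PySem.Str.toList_replace]
  simp only [PySem.Str.lower, PySem.Chars.lower, String.toList_ofList]
  show _ = PySem.Chars.replace (s.toList.map PySem.Chars.lowerChar) ['a'] ['A']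
  rw [replace_a, List.map_map]
  exact List.map_congr_left (fun c _ => (char_pointwise c).symm)
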